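-- pv_equiv track=rewrite | github.com/bspaans/python-mingus | core/notes.py | remove_redundant_accidentals
-- ===== SOURCE A (Python) =====
-- def remove_redundant_accidentals(note):
--     """Remove redundant sharps and flats from the given note.
--
--     Examples:
--     >>> remove_redundant_accidentals('C##b')
--     'C#'
--     >>> remove_redundant_accidentals('Eb##b')
--     'E'
--     """
--     val = 0
--     for token in note[1:]:
--         if token == 'b':
--             val -= 1
--         elif token == '#':
--             val += 1
--     result = note[0]
--     while val > 0:
--         result = augment(result)
--         val -= 1
--     while val < 0:
--         result = diminish(result)
--         val += 1
--     return result
--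
-- def augment(note):
--     """Augment a given note.
--
--     Examples:
--     >>> augment('C')
--     'C#'
--     >>> augment('Cb')
--     'C'
--     """
--     if note[-1] != 'b':
--         return note + '#'
--     else:
--         return note[:-1]
--
-- def diminish(note):
--     """Diminish a given note.
--
--     Examples:
--     >>> diminish('C')
--     'Cb'
--     >>> diminish('C#')
--     'C'
--     """
--     if note[-1] != '#':
--         return note + 'b'
--     else:
--         return note[:-1]
-- ===== SOURCE B (Python) =====
-- def remove_redundant_accidentals(note):
--     """Remove redundant sharps and flats from the given note."""
--     tail = note[1:]
--     val = tail.count('#') - tail.count('b')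
--     if val >= 0:
--         return note[0] + '#' * val
--     return note[0] + 'b' * (-val)
-- ===== Notes on version B (the rewrite author's own statement) =====
-- stated objective: faster
-- what changed: Instead of an O(n) accidental scan followed by O(n) repeated augment/diminish calls that rebuild the result string each step (quadratic in the accidental count), B counts net accidentals with str.count and builds the result in one concatenation base + '#'*val or 'b'*(-val).
-- outside the precondition, e.g. on remove_redundant_accidentals('b#'): A returns '', B returns 'b#'; on remove_redundant_accidentals('#b'): A returns '', B returns '#b'
import Mathlib
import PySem

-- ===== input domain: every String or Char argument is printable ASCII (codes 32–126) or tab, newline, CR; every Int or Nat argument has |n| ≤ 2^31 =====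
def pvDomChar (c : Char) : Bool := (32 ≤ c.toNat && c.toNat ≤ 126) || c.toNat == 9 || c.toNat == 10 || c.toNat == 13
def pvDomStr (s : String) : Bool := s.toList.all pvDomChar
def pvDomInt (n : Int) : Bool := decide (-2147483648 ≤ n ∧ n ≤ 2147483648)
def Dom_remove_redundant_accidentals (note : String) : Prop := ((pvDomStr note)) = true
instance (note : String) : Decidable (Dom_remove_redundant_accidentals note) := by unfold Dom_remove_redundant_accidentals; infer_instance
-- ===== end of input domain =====

-- B replaces A's quadratic augment/diminish loop by counting net accidentals and one concatenation (faster, asymptotic).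


-- ===== PORT A =====
-- augment(note): append '#' unless the last char is 'b', else drop the last char (on List Char)
def pvAug (r : List Char) : List Char :=
  if r.getLast? ≠ some 'b' then r ++ ['#'] else r.dropLast

-- diminish(note): append 'b' unless the last char is '#', else drop the last char
def pvDim (r : List Char) : List Char :=
  if r.getLast? ≠ some '#' then r ++ ['b'] else r.dropLast

-- "while val > 0: result = augment(result); val -= 1"
def pvAugN : Nat → List Char → List Char
  | 0, r => r
  | n + 1, r => pvAugN n (pvAug r)

-- "while val < 0: result = diminish(result); val += 1"
def pvDimN : Nat → List Char → List Char
  | 0, r => r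
  | n + 1, r => pvDimN n (pvDim r)

def remove_redundant_accidentals (note : String) : String :=
  let val : Int := (note.toList.drop 1).foldl
    (fun v token => if token = 'b' then v - 1 else if token = '#' then v + 1 else v) 0
  let result := note.toList.take 1     -- note[0] (Pre_ guarantees the note is non-empty)
  let result := if 0 < val then pvAugN val.toNat result else pvDimN (-val).toNat result
  String.ofList result

-- ===== PORT B =====
def remove_redundant_accidentals_alt (note : String) : String :=
  let tail := note.toList.drop 1
  let val : Int := (tail.count '#' : Int) - (tail.count 'b' : Int)
  if 0 ≤ val then String.ofList (note.toList.take 1 ++ List.replicate val.toNat '#')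
  else String.ofList (note.toList.take 1 ++ List.replicate (-val).toNat 'b')

-- ===== PRECONDITION & SPEC =====
-- Pre_ excludes the empty note (A raises IndexError on note[0]) and notes whose first character
-- is itself an accidental mark conflicting with the net accidental of the rest (head 'b' with
-- positive net, or head '#' with negative net): there A's augment/diminish chain cancels away the
-- base character, returning '' at net ±1 and raising IndexError beyond — accidental artefacts of
-- A's implementation that no caller would specify.
def Pre_remove_redundant_accidentals (note : String) : Prop :=
  note.toList ≠ [] ∧
  ¬(note.toList.headI = 'b' ∧
      0 < ((note.toList.drop 1).count '#' : Int) - ((note.toList.drop 1).count 'b' : Int)) ∧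
  ¬(note.toList.headI = '#' ∧
      ((note.toList.drop 1).count '#' : Int) - ((note.toList.drop 1).count 'b' : Int) < 0)
instance (note : String) : Decidable (Pre_remove_redundant_accidentals note) := by
  unfold Pre_remove_redundant_accidentals; infer_instance

def pvWitness_remove_redundant_accidentals : String := "C##b"

def Spec_remove_redundant_accidentals (note : String) (out : String) : Prop :=
  out = remove_redundant_accidentals_alt note
instance (note : String) (out : String) : Decidable (Spec_remove_redundant_accidentals note out) := by
  unfold Spec_remove_redundant_accidentals; infer_instance

-- ===== CLAIM (what is proved, stated in full; the proofs are below) =====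
def Claim_equal_remove_redundant_accidentals : Prop :=
  ∀ (note : String), Dom_remove_redundant_accidentals note →
    Pre_remove_redundant_accidentals note →
    Spec_remove_redundant_accidentals note (remove_redundant_accidentals note)

-- ===== LEMMAS AND PROOFS =====

-- A's per-character fold computes the net accidental count.
lemma pv_foldl_net (l : List Char) (acc : Int) :
    l.foldl (fun v token => if token = 'b' then v - 1 else if token = '#' then v + 1 else v) acc
      = acc + (l.count '#' : Int) - (l.count 'b' : Int) := by
  induction l generalizing acc with
  | nil => simp
  | cons c t ih =>
    by_cases hb : c = 'b'
    · simp [hb, ih]; ring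
    · by_cases hs : c = '#'
      · simp [hs, ih]; ring
      · simp [List.foldl_cons, hb, hs, ih]

lemma pvAug_rep (c : Char) (hc : c ≠ 'b') (k : Nat) :
    pvAug (c :: List.replicate k '#') = c :: List.replicate (k + 1) '#' := by
  have hlast : (c :: List.replicate k '#').getLast? ≠ some 'b' := by
    cases k with
    | zero => simpa using hc
    | succ m =>
      have : (c :: List.replicate (m + 1) '#') = (c :: List.replicate m '#') ++ ['#'] := by
        simp [List.replicate_succ']
      rw [this, List.getLast?_concat]
      decide
  simp [pvAug, hlast, List.replicate_succ']

lemma pvDim_rep (c : Char) (hc : c ≠ '#') (k : Nat) :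
    pvDim (c :: List.replicate k 'b') = c :: List.replicate (k + 1) 'b' := by
  have hlast : (c :: List.replicate k 'b').getLast? ≠ some '#' := by
    cases k with
    | zero => simpa using hc
    | succ m =>
      have : (c :: List.replicate (m + 1) 'b') = (c :: List.replicate m 'b') ++ ['b'] := by
        simp [List.replicate_succ']
      rw [this, List.getLast?_concat]
      decide
  simp [pvDim, hlast, List.replicate_succ']

lemma pvAugN_rep (c : Char) (hc : c ≠ 'b') (n k : Nat) :
    pvAugN n (c :: List.replicate k '#') = c :: List.replicate (k + n) '#' := by
  induction n generalizing k with
  | zero => simp [pvAugN]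
  | succ m ih =>
    rw [pvAugN, pvAug_rep c hc k, ih (k + 1)]
    ring_nf

lemma pvDimN_rep (c : Char) (hc : c ≠ '#') (n k : Nat) :
    pvDimN n (c :: List.replicate k 'b') = c :: List.replicate (k + n) 'b' := by
  induction n generalizing k with
  | zero => simp [pvDimN]
  | succ m ih =>
    rw [pvDimN, pvDim_rep c hc k, ih (k + 1)]
    ring_nf

-- ===== VERDICT (by name: the statement is the Claim_ definition above) =====
theorem remove_redundant_accidentals_spec : Claim_equal_remove_redundant_accidentals := by
  intro note _ hpre
  obtain ⟨hne, hb, hs⟩ := hpre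
  unfold Spec_remove_redundant_accidentals
  unfold remove_redundant_accidentals remove_redundant_accidentals_alt
  cases hL : note.toList with
  | nil => exact absurd hL hne
  | cons c rest =>
    rw [hL] at hb hs
    simp only [List.drop_succ_cons, List.drop_zero, List.take_succ_cons, List.take_zero,
      List.headI] at hb hs ⊢
    rw [pv_foldl_net]
    set net : Int := (rest.count '#' : Int) - (rest.count 'b' : Int) with hnet
    have hz : (0 : Int) + (rest.count '#' : Int) - (rest.count 'b' : Int) = net := by omega
    rw [hz]
    rcases lt_trichotomy (0 : Int) net with hpos | hzero | hneg
    · have hc : c ≠ 'b' := fun h => hb ⟨h, hpos⟩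
      rw [if_pos hpos, if_pos (le_of_lt hpos)]
      exact congrArg String.ofList (by simpa using pvAugN_rep c hc net.toNat 0)
    · rw [if_neg (by omega), if_pos (by omega)]
      simp [← hzero, pvDimN]
    · have hc : c ≠ '#' := fun h => hs ⟨h, hneg⟩
      rw [if_neg (by omega), if_neg (by omega)]
      exact congrArg String.ofList (by simpa using pvDimN_rep c hc (-net).toNat 0)
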